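-- pv_equiv track=rewrite | github.com/ReginaNasyrova/RussianGEC_SeqTagger | scripts/preprocess.py | map_in_feats
-- ===== SOURCE A (Python) =====
-- def map_in_feats(IN_info):
--     """
--     IN_info: tuple (list of input_tokens, list of morphological feats)
--     applies after alignment collapse,
--     so there may be only ordinary tokens or tokens with spaces ("на счет") as input tokens
--     maps morphological features to the first input token in a row
--     """
--     in_tokens, in_features = IN_info
--     curr_ind = -1
--     ins = []
--     for in_token in in_tokens[1:]: ## in_tokens[0] = "CLS"
--         curr_ind += 1
--         try:
--             ins.append(in_features[curr_ind])
--         except: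
--             return "ERROR: SENTENCE CONTAINS OVERLAPPING ANNOTATIONS"
--         if " " in in_token:
--             curr_ind += len(in_token.split())-1
--     assert curr_ind == len(in_features)-1
--     ins = [None] + ins ## [None] for CLS token
--     return ins
-- ===== SOURCE B (Python) =====
-- def map_in_feats(IN_info):
--     in_tokens, in_features = IN_info
--     # weight of each token = how many feature slots it consumes in A's pointer walk
--     weights = [len(t.split()) if " " in t else 1 for t in in_tokens[1:]]
--     starts = [0]
--     for w in weights:
--         starts.append(starts[-1] + w)
--     try:
--         gathered = [in_features[s] for s in starts[:-1]]
--     except IndexError: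
--         return "ERROR: SENTENCE CONTAINS OVERLAPPING ANNOTATIONS"
--     assert starts[-1] == len(in_features)
--     return [None] + gathered
-- ===== Notes on version B (the rewrite author's own statement) =====
-- stated objective: alternative
-- what changed: Replaces A's interleaved pointer walk (mutating curr_ind while appending inside one loop) by a precomputed start-index table (per-token weights, prefix sums) followed by a separate gather pass.
import Mathlib
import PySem

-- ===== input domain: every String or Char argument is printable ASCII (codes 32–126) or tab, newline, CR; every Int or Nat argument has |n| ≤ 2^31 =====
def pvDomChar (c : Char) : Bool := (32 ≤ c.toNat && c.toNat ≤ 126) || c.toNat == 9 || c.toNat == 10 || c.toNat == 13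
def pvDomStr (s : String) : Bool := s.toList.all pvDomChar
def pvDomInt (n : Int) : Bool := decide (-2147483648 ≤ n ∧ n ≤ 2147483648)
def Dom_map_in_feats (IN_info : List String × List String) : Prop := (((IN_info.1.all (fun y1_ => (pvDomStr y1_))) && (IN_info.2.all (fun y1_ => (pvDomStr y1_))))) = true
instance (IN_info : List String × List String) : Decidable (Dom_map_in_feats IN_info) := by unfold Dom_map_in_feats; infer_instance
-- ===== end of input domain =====

-- B is an alternative decomposition: A's single loop mutating a feature pointer becomes a
-- precomputed start-index table (weights, prefix sums) plus a separate gather pass.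
-- On inputs outside Pre_ the Python A returns a bare error string or raises AssertionError
-- (neither a List (Option String)); both ports return [] there, nothing is claimed.

-- ===== PORT A =====
-- the loop over in_tokens[1:]: state (curr_ind, ins); none = the 'except' early return (error string)
def pvLoopA (feats : List String) : List String → Int → List (Option String) → Option (Int × List (Option String))
  | [], ci, ins => some (ci, ins)
  | t :: rest, ci, ins =>
    let ci := ci + 1
    match PySem.List.pyGet? feats ci with
    | none => none
    | some f =>
      let ci := if PySem.Str.isIn " " t then ci + ((PySem.Str.split₀ t).length : Int) - 1 else ci
      pvLoopA feats rest ci (ins ++ [Option.some f])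

def map_in_feats (IN_info : List String × List String) : List (Option String) :=
  let in_tokens := IN_info.1
  let in_features := IN_info.2
  match pvLoopA in_features (PySem.List.slice in_tokens (some 1) none) (-1) [] with
  | none => []  -- Python returns the error STRING (not a list) here; excluded by Pre_
  | some (ci, ins) =>
    if ci = (in_features.length : Int) - 1 then Option.none :: ins
    else []  -- Python raises AssertionError here; excluded by Pre_

-- ===== PORT B =====
-- the gather pass: in_features[s] for each start; none = the except branch (error string)
def pvGather (feats : List String) : List Nat → Option (List (Option String))
  | [] => some []
  | s :: rest =>
    match PySem.List.pyGet? feats (s : Int) with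
    | none => none
    | some f => (pvGather feats rest).map (fun g => Option.some f :: g)

def map_in_feats_alt (IN_info : List String × List String) : List (Option String) :=
  let in_tokens := IN_info.1
  let in_features := IN_info.2
  let weights := (PySem.List.slice in_tokens (some 1) none).map
    (fun t => if PySem.Str.isIn " " t then (PySem.Str.split₀ t).length else 1)
  let starts := weights.foldl (fun acc w => acc ++ [acc.getLast! + w]) [0]
  match pvGather in_features starts.dropLast with
  | none => []  -- error string in Python; excluded by Pre_
  | some gathered =>
    if starts.getLast! = in_features.length then Option.none :: gathered
    else []  -- AssertionError in Python; excluded by Pre_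

-- ===== PRECONDITION & SPEC =====
-- prefix sums of the weights, starting at s (the start-index table, including the total)
def pvScan (s : Nat) : List Nat → List Nat
  | [] => [s]
  | w :: rest => s :: pvScan (s + w) rest

-- Pre_ excludes the inputs where A does not return a list: an index past in_features
-- (A returns a bare error string) or leftover/missing features (the assert raises).
def Pre_map_in_feats (IN_info : List String × List String) : Prop :=
  let ws := (IN_info.1.drop 1).map
    (fun t => if PySem.Str.isIn " " t then (PySem.Str.split₀ t).length else 1)
  ((pvScan 0 ws).dropLast.all (fun s => s < IN_info.2.length)) = true
    ∧ ws.sum = IN_info.2.length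
instance (IN_info : List String × List String) : Decidable (Pre_map_in_feats IN_info) := by
  unfold Pre_map_in_feats; infer_instance

def pvWitness_map_in_feats : (List String × List String) := (["CLS", "a", "b c"], ["F1", "F2", "F3"])

def Spec_map_in_feats (IN_info : List String × List String) (out : List (Option String)) : Prop := out = map_in_feats_alt IN_info
instance (IN_info : List String × List String) (out : List (Option String)) : Decidable (Spec_map_in_feats IN_info out) := by unfold Spec_map_in_feats; infer_instance

-- ===== CLAIM (what is proved, stated in full; the proofs are below) =====
def Claim_equal_map_in_feats : Prop := ∀ (IN_info : List String × List String), Dom_map_in_feats IN_info → Pre_map_in_feats IN_info → Spec_map_in_feats IN_info (map_in_feats IN_info)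

-- ===== LEMMAS AND PROOFS =====

-- token weight, and the list of start indices visited by A's walk from start s
def pvWt (t : String) : Nat :=
  if PySem.Str.isIn " " t then (PySem.Str.split₀ t).length else 1

def pvStartsFrom (s : Nat) : List String → List Nat
  | [] => []
  | t :: rest => s :: pvStartsFrom (s + pvWt t) rest

def pvSumW (ts : List String) : Nat := (ts.map pvWt).sum

-- A's loop from curr_ind = s-1 is the gather over the visited starts
theorem pvLoopA_eq (feats : List String) (toks : List String) (s : Nat) (ins : List (Option String)) :
    pvLoopA feats toks ((s : Int) - 1) ins =
      (pvGather feats (pvStartsFrom s toks)).map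
        (fun g => (((s + pvSumW toks : Nat) : Int) - 1, ins ++ g)) := by
  induction toks generalizing s ins with
  | nil => simp [pvLoopA, pvStartsFrom, pvGather, pvSumW]
  | cons t rest ih =>
    simp only [pvLoopA, pvStartsFrom, pvGather]
    have hci : (s : Int) - 1 + 1 = (s : Int) := by omega
    rw [hci]
    cases hg : PySem.List.pyGet? feats (s : Int) with
    | none => simp
    | some f =>
      simp only [Option.map_map]
      have harg : (if PySem.Str.isIn " " t then (s : Int) + ((PySem.Str.split₀ t).length : Int) - 1
          else (s : Int)) = ((s + pvWt t : Nat) : Int) - 1 := by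
        unfold pvWt; split <;> push_cast <;> omega
      rw [harg, ih]
      have hsum : ((s + pvWt t + pvSumW rest : Nat) : Int) = ((s + pvSumW (t :: rest) : Nat) : Int) := by
        simp [pvSumW]; omega
      cases pvGather feats (pvStartsFrom (s + pvWt t) rest) with
      | none => simp
      | some g => simp [hsum]

-- the foldl that builds B's starts table, peeled one accumulator cell at a time
theorem pvFoldl_starts (ws : List Nat) (a : List Nat) (s : Nat) :
    ws.foldl (fun acc w => acc ++ [acc.getLast! + w]) (a ++ [s]) =
      a ++ pvScan s ws := by
  induction ws generalizing a s with
  | nil => simp [pvScan]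
  | cons w rest ih =>
    simp only [List.foldl_cons]
    have hl : (a ++ [s]).getLast! = s := by simp
    rw [hl, List.append_assoc a [s] [s + w], ← List.append_assoc a [s] [s + w],
      ih (a ++ [s]) (s + w)]
    simp [pvScan]

-- the prefix-sum table is pvStartsFrom plus the final total
theorem pvScan_eq_startsFrom (toks : List String) (s : Nat) :
    pvScan s (toks.map pvWt) = pvStartsFrom s toks ++ [s + pvSumW toks] := by
  induction toks generalizing s with
  | nil => simp [pvStartsFrom, pvSumW, pvScan]
  | cons t rest ih =>
    simp only [List.map_cons, pvScan, pvStartsFrom, List.cons_append]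
    rw [ih (s + pvWt t)]
    simp [pvSumW, Nat.add_assoc]

theorem pvStarts_table (toks : List String) :
    (toks.map pvWt).foldl (fun acc w => acc ++ [acc.getLast! + w]) [0] =
      pvStartsFrom 0 toks ++ [pvSumW toks] := by
  have h := pvFoldl_starts (toks.map pvWt) [] 0
  simp only [List.nil_append] at h
  rw [h, pvScan_eq_startsFrom]
  simp

-- ===== VERDICT (by name: the statement is the Claim_ definition above) =====
theorem map_in_feats_spec : Claim_equal_map_in_feats := by
  intro IN_info _ _
  unfold Spec_map_in_feats map_in_feats map_in_feats_alt
  obtain ⟨toks0, feats⟩ := IN_info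
  simp only
  set toks := PySem.List.slice toks0 (some 1) none with htoks
  have hmap : toks.map (fun t => if PySem.Str.isIn " " t then (PySem.Str.split₀ t).length else 1)
      = toks.map pvWt := by
    simp [pvWt]
  rw [hmap, pvStarts_table]
  have hA := pvLoopA_eq feats toks 0 []
  simp only [Nat.cast_zero, zero_add, zero_sub] at hA
  rw [hA]
  have hdrop : (pvStartsFrom 0 toks ++ [pvSumW toks]).dropLast = pvStartsFrom 0 toks := by
    simp
  have hlast : (pvStartsFrom 0 toks ++ [pvSumW toks]).getLast! = pvSumW toks := by
    simp
  rw [hdrop, hlast]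
  cases pvGather feats (pvStartsFrom 0 toks) with
  | none => simp
  | some g =>
    simp only [Option.map_some, List.nil_append]
    have : ((pvSumW toks : Int) - 1 = (feats.length : Int) - 1) ↔ (pvSumW toks = feats.length) := by
      omega
    by_cases h : pvSumW toks = feats.length
    · simp [h]
    · rw [if_neg (by omega), if_neg h]
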